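-- pv_equiv track=rewrite | github.com/Terristwj/IS111-Intro-to-Programming | IS111 - Introduction to Programming G2/My codes/IS111/Lab Test 1/Lab Test 1 (AY2021-22 T1)/your_email_id/q2b.py | get_all_third_digits
-- ===== SOURCE A (Python) =====
-- def get_all_third_digits(str_list):
--     # Replace the code below with your implementation.
--     num_list = []
--     for str in str_list:
--         digit_count = 0
--         for ch in str:
--             if ch.isnumeric():
--                 digit_count += 1
--                 if digit_count == 3:
--                     num_list.append(int(ch))
--
--     return num_list
-- ===== SOURCE B (Python) =====
-- def get_all_third_digits(str_list):
--     out = []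
--     for s in str_list:
--         digits = [ch for ch in s if ch.isnumeric()]
--         if len(digits) >= 3:
--             out.append(int(digits[2]))
--     return out
-- ===== Notes on version B (the rewrite author's own statement) =====
-- stated objective: simpler
-- what changed: A threads a running digit counter through each string and appends inline the moment the counter hits 3; B first extracts each string's digit characters with a comprehension and then simply indexes the third one under a length guard.
import Mathlib
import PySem

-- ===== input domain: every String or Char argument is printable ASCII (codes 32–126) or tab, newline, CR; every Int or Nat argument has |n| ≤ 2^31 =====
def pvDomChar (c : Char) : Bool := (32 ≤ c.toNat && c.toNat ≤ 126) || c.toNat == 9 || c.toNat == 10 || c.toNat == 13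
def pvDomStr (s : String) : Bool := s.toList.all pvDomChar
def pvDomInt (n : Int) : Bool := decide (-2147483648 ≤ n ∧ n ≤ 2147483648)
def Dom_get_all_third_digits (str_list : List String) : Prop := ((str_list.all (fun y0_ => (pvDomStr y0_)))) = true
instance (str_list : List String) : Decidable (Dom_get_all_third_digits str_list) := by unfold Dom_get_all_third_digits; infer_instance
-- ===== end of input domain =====

-- B replaces A's inline counter-and-append with extract-the-digits-then-index-the-third; same cost, plainer shape.
-- ch.isnumeric() is ported as PySem.Chars.isdigit (equal on the printable-ASCII domain), and
-- int(ch) for an ASCII digit ch is ported exactly as its code point minus 48.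

-- int(ch) for a single ASCII digit character: exact on the domain (isdigit guard holds where it is used)
def pvDigitVal (ch : Char) : Int := (ch.toNat : Int) - 48

-- ===== PORT A =====
def get_all_third_digits (str_list : List String) : List Int :=
  str_list.foldl
    (fun num_list s =>
      (s.toList.foldl
        (fun (st : List Int × Nat) ch =>
          if PySem.Chars.isdigit ch then
            let dc := st.2 + 1
            (if dc = 3 then st.1 ++ [pvDigitVal ch] else st.1, dc)
          else st)
        (num_list, 0)).1)
    []

-- ===== PORT B =====
def get_all_third_digits_alt (str_list : List String) : List Int :=
  str_list.foldl
    (fun out s =>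
      let digits := s.toList.filter (fun ch => PySem.Chars.isdigit ch)
      if 3 ≤ digits.length then out ++ [pvDigitVal (digits.getD 2 '0')] else out)
    []
-- digits[2] is in range by the length guard, so List.getD with a dummy default is exact.

-- ===== PRECONDITION & SPEC =====
def Spec_get_all_third_digits (str_list : List String) (out : List Int) : Prop := out = get_all_third_digits_alt str_list
instance (str_list : List String) (out : List Int) : Decidable (Spec_get_all_third_digits str_list out) := by unfold Spec_get_all_third_digits; infer_instance

-- ===== CLAIM (what is proved, stated in full; the proofs are below) =====
def Claim_equal_get_all_third_digits : Prop := ∀ (str_list : List String), Dom_get_all_third_digits str_list → Spec_get_all_third_digits str_list (get_all_third_digits str_list)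

-- ===== LEMMAS AND PROOFS =====

-- the list of values A's inner loop appends, starting from digit count c
def pvExtra (cs : List Char) (c : Nat) : List Int :=
  match cs with
  | [] => []
  | ch :: cs =>
    if PySem.Chars.isdigit ch then
      (if c + 1 = 3 then [pvDigitVal ch] else []) ++ pvExtra cs (c + 1)
    else pvExtra cs c

theorem pvExtra_ge_three (cs : List Char) (c : Nat) (h : 3 ≤ c) : pvExtra cs c = [] := by
  induction cs generalizing c with
  | nil => rfl
  | cons ch cs ih =>
    simp only [pvExtra]
    split_ifs with h1 h2
    · omega
    · simpa using ih (c + 1) (by omega)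
    · exact ih c h

theorem pvInner_fst (cs : List Char) (acc : List Int) (c : Nat) :
    (cs.foldl
      (fun (st : List Int × Nat) ch =>
        if PySem.Chars.isdigit ch then
          let dc := st.2 + 1
          (if dc = 3 then st.1 ++ [pvDigitVal ch] else st.1, dc)
        else st)
      (acc, c)).1 = acc ++ pvExtra cs c := by
  induction cs generalizing acc c with
  | nil => simp [pvExtra]
  | cons ch cs ih =>
    by_cases hd : PySem.Chars.isdigit ch
    · by_cases h3 : c + 1 = 3
      · simp only [List.foldl_cons, pvExtra, hd, h3, if_true]
        rw [ih]; simp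
      · simp only [List.foldl_cons, pvExtra, hd, h3, if_true]
        rw [ih]; simp
    · simp only [List.foldl_cons, pvExtra, hd, Bool.false_eq_true, if_false]
      exact ih acc c

theorem pvExtra_eq (cs : List Char) (c : Nat) (hc : c < 3) :
    pvExtra cs c =
      (let ds := cs.filter (fun ch => PySem.Chars.isdigit ch)
       if 3 - c ≤ ds.length then [pvDigitVal (ds.getD (2 - c) '0')] else []) := by
  induction cs generalizing c with
  | nil => simp [pvExtra]; omega
  | cons ch cs ih =>
    simp only [pvExtra, List.filter_cons]
    by_cases hd : PySem.Chars.isdigit ch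
    · simp only [hd, if_pos]
      by_cases h3 : c + 1 = 3
      · have hc2 : c = 2 := by omega
        subst hc2
        simp [pvExtra_ge_three cs 3 (by omega)]
      · rw [ih (c + 1) (by omega)]
        have h1 : (3 - (c + 1) ≤ (cs.filter (fun ch => PySem.Chars.isdigit ch)).length)
            = (3 - c ≤ (cs.filter (fun ch => PySem.Chars.isdigit ch)).length + 1) := by
          simp; omega
        have h2 : 2 - c = (2 - (c + 1)) + 1 := by omega
        simp only [if_neg h3, List.nil_append, h1, h2, List.length_cons]
        split_ifs with h4
        · simp [List.getD]
        · rfl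
    · simp only [hd, ite_false, Bool.false_eq_true]
      exact ih c hc

theorem pvStep_eq :
    (fun (num_list : List Int) (s : String) =>
      (s.toList.foldl
        (fun (st : List Int × Nat) ch =>
          if PySem.Chars.isdigit ch then
            let dc := st.2 + 1
            (if dc = 3 then st.1 ++ [pvDigitVal ch] else st.1, dc)
          else st)
        (num_list, 0)).1)
    = (fun (out : List Int) (s : String) =>
      let digits := s.toList.filter (fun ch => PySem.Chars.isdigit ch)
      if 3 ≤ digits.length then out ++ [pvDigitVal (digits.getD 2 '0')] else out) := by
  funext acc s
  rw [pvInner_fst, pvExtra_eq s.toList 0 (by omega)]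
  simp
  split_ifs <;> simp

-- ===== VERDICT (by name: the statement is the Claim_ definition above) =====
theorem get_all_third_digits_spec : Claim_equal_get_all_third_digits := by
  intro str_list _
  unfold Spec_get_all_third_digits get_all_third_digits get_all_third_digits_alt
  rw [pvStep_eq]
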